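-- pv_equiv track=rewrite | github.com/archie-projects/TDS_Project_2 | .history/app_20250807000557.py | _get_actual_column_name
-- ===== SOURCE A (Python) =====
-- from typing import Any, Dict, List
--
-- def _get_actual_column_name(df_columns: List[str], requested_name: str) -> str:
--     """Finds the actual column name that best matches the requested name."""
--     requested_lower = requested_name.lower()
--     for col in df_columns:
--         if requested_lower == col.lower():
--             return f'"{col}"'
--     for col in df_columns:
--         if requested_lower in col.lower():
--             return f'"{col}"'
--     raise ValueError(f"Could not find a column that matches '{requested_name}'. Available columns: {df_columns}")
-- ===== SOURCE B (Python) =====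
-- from typing import List
--
-- def _get_actual_column_name(df_columns: List[str], requested_name: str) -> str:
--     """Single pass: exact match returns immediately; first substring match is remembered."""
--     requested_lower = requested_name.lower()
--     first_substring = None
--     for col in df_columns:
--         col_lower = col.lower()
--         if requested_lower == col_lower:
--             return f'"{col}"'
--         if first_substring is None and requested_lower in col_lower:
--             first_substring = col
--     if first_substring is not None:
--         return f'"{first_substring}"'
--     raise ValueError(f"Could not find a column that matches '{requested_name}'. Available columns: {df_columns}")
-- ===== Notes on version B (the rewrite author's own statement) =====
-- stated objective: faster
-- what changed: Replaces A's two full passes (one for exact matches, one for substring matches) by a single pass that returns on an exact match and records the first substring candidate in a variable.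
-- outside the precondition, e.g. on _get_actual_column_name(['a'], 'b'): A raises ValueError, B raises ValueError
import Mathlib
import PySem

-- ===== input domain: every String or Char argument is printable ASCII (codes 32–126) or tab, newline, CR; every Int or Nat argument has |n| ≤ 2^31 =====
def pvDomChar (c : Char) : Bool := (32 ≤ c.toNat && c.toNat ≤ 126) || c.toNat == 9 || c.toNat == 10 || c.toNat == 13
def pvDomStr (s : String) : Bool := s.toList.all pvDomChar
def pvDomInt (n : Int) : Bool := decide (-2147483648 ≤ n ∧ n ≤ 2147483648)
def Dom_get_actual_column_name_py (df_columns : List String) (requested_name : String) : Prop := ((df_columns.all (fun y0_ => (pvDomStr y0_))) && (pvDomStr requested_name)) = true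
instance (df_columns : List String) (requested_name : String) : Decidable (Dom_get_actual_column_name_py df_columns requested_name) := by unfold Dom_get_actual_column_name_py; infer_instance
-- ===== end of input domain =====

-- B merges A's two passes into one loop that returns on an exact match and records the
-- first substring candidate (objective: faster, by halving the passes; not measured).

-- ===== PORT A =====
def pvAExact (rl : String) : List String → Option String
  | [] => none
  | c :: rest => if rl == PySem.Str.lower c then some c else pvAExact rl rest

def pvASub (rl : String) : List String → Option String
  | [] => none
  | c :: rest => if PySem.Str.isIn rl (PySem.Str.lower c) then some c else pvASub rl rest

def get_actual_column_name_py (df_columns : List String) (requested_name : String) : String :=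
  let rl := PySem.Str.lower requested_name
  match pvAExact rl df_columns with
  | some c => "\"" ++ c ++ "\""
  | none =>
    match pvASub rl df_columns with
    | some c => "\"" ++ c ++ "\""
    | none => ""  -- Python raises ValueError here; excluded by Pre_

-- ===== PORT B =====
def pvBLoop (rl : String) : List String → Option String → Option String
  | [], acc => acc
  | c :: rest, acc =>
    let cl := PySem.Str.lower c
    if rl == cl then some c
    else pvBLoop rl rest (if acc.isNone && PySem.Str.isIn rl cl then some c else acc)

def get_actual_column_name_py_alt (df_columns : List String) (requested_name : String) : String :=
  let rl := PySem.Str.lower requested_name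
  match pvBLoop rl df_columns none with
  | some c => "\"" ++ c ++ "\""
  | none => ""  -- Python raises ValueError here; excluded by Pre_

-- ===== PRECONDITION & SPEC =====
-- Pre_ excludes exactly the inputs on which A (and B) raise ValueError: no column whose
-- lowercase form contains the lowercase requested name.
def Pre_get_actual_column_name_py (df_columns : List String) (requested_name : String) : Prop :=
  df_columns.any (fun col => PySem.Str.isIn (PySem.Str.lower requested_name) (PySem.Str.lower col)) = true
instance (df_columns : List String) (requested_name : String) : Decidable (Pre_get_actual_column_name_py df_columns requested_name) := by unfold Pre_get_actual_column_name_py; infer_instance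

def pvWitness_get_actual_column_name_py : List String × String := (["Name", "Age"], "name")

def Spec_get_actual_column_name_py (df_columns : List String) (requested_name : String) (out : String) : Prop := out = get_actual_column_name_py_alt df_columns requested_name
instance (df_columns : List String) (requested_name : String) (out : String) : Decidable (Spec_get_actual_column_name_py df_columns requested_name out) := by unfold Spec_get_actual_column_name_py; infer_instance

-- ===== CLAIM (what is proved, stated in full; the proofs are below) =====
def Claim_equal_get_actual_column_name_py : Prop := ∀ (df_columns : List String) (requested_name : String), Dom_get_actual_column_name_py df_columns requested_name → Pre_get_actual_column_name_py df_columns requested_name → Spec_get_actual_column_name_py df_columns requested_name (get_actual_column_name_py df_columns requested_name)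

-- ===== LEMMAS AND PROOFS =====

-- B's loop, started with accumulator acc, returns the first exact match if any, else the
-- accumulator if set, else the first substring match.
theorem pvBLoop_eq (rl : String) (cols : List String) (acc : Option String) :
    pvBLoop rl cols acc =
      match pvAExact rl cols with
      | some c => some c
      | none => match acc with
        | some a => some a
        | none => pvASub rl cols := by
  induction cols generalizing acc with
  | nil => cases acc <;> simp [pvBLoop, pvAExact, pvASub]
  | cons c rest ih =>
    simp only [pvBLoop, pvAExact, pvASub]
    by_cases h : (rl == PySem.Str.lower c) = true
    · rw [if_pos h, if_pos h]
    · rw [if_neg h, if_neg h]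
      rw [ih]
      cases acc with
      | some a => cases pvAExact rl rest <;> rfl
      | none =>
        by_cases hs : PySem.Str.isIn rl (PySem.Str.lower c) = true
        · rw [if_pos (by rw [Option.isNone_none, Bool.true_and]; exact hs), if_pos hs]
        · rw [if_neg (by rw [Option.isNone_none, Bool.true_and]; exact hs), if_neg hs]

-- ===== VERDICT (by name: the statement is the Claim_ definition above) =====
theorem get_actual_column_name_py_spec : Claim_equal_get_actual_column_name_py := by
  intro cols r _ _
  unfold Spec_get_actual_column_name_py get_actual_column_name_py get_actual_column_name_py_alt
  simp only [pvBLoop_eq]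
  cases pvAExact (PySem.Str.lower r) cols <;> cases pvASub (PySem.Str.lower r) cols <;> simp
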